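-- pv_equiv track=rewrite | github.com/Agular/homework | Python/Codeclub/mixified.py | count_mixified
-- ===== SOURCE A (Python) =====
-- def count_mixified(paragraph):
--     alphabet = "ABCDEFGHIJKLMNOPQRSTUVWXYZ"
--     alphabet2 = "abcdefghijklmnopqrstuvwxyz"
--     num_words = 0
--     list_words = paragraph.strip().split()
--     for word in list_words:
--         if len(word) >= 3:
--             counter = True
--             for idx, char in enumerate(word):
--                 if str.isalpha(char):
--                     if idx % 2 == 0:
--                         if char not in alphabet:
--                             counter = False
--                     if idx % 2 == 1:
--                         if char not in alphabet2:
--                             counter = False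
--             if counter is True:
--                 num_words += 1
--     return num_words
-- ===== SOURCE B (Python) =====
-- def count_mixified(paragraph):
--     upper = "ABCDEFGHIJKLMNOPQRSTUVWXYZ"
--     lower = "abcdefghijklmnopqrstuvwxyz"
--     return sum(
--         1
--         for word in paragraph.strip().split()
--         if len(word) >= 3
--         and all(not c.isalpha() or c in upper for c in word[::2])
--         and all(not c.isalpha() or c in lower for c in word[1::2])
--     )
-- ===== Notes on version B (the rewrite author's own statement) =====
-- stated objective: alternative
-- what changed: Replaces the enumerate loop with idx%2 branching and a mutable flag by splitting each word into its even- and odd-index subsequences via slicing (word[::2], word[1::2]) and checking each with all(), counting matches with sum over a generator.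
import Mathlib
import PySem

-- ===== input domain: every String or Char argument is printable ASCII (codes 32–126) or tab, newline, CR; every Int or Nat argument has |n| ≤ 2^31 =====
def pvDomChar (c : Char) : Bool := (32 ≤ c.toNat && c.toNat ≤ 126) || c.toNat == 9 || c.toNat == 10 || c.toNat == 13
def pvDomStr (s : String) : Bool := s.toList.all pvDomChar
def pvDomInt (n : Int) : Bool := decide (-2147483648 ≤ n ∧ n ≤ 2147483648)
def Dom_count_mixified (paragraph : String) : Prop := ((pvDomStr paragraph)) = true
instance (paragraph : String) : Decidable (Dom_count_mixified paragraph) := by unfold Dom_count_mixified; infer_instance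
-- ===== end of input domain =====

-- B replaces A's enumerate loop with idx%2 branching and a mutable flag by slicing each
-- word into its even- and odd-index subsequences and checking each with all() (alternative).

-- ===== PORT A =====
def pvUpperA : List Char := "ABCDEFGHIJKLMNOPQRSTUVWXYZ".toList
def pvLowerA : List Char := "abcdefghijklmnopqrstuvwxyz".toList

def count_mixified (paragraph : String) : Int :=
  (PySem.Chars.split₀ (PySem.Chars.strip paragraph.toList)).foldl
    (fun num_words word =>
      if word.length ≥ 3 then
        let counter := (PySem.List.enumerate word).foldl
          (fun counter ic =>
            if PySem.Chars.isalpha ic.2 then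
              let counter1 :=
                if PySem.Int.mod ic.1 2 = 0 then
                  (if ¬ pvUpperA.contains ic.2 then false else counter)
                else counter
              if PySem.Int.mod ic.1 2 = 1 then
                (if ¬ pvLowerA.contains ic.2 then false else counter1)
              else counter1
            else counter) true
        if counter = true then num_words + 1 else num_words
      else num_words) 0

-- ===== PORT B =====
def pvEvenOk (w : List Char) : Bool :=
  ((PySem.List.slice? w none none 2).getD []).all
    (fun c => !PySem.Chars.isalpha c || pvUpperA.contains c)

def pvOddOk (w : List Char) : Bool :=
  ((PySem.List.slice? w (some 1) none 2).getD []).all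
    (fun c => !PySem.Chars.isalpha c || pvLowerA.contains c)

def count_mixified_alt (paragraph : String) : Int :=
  ((PySem.Chars.split₀ (PySem.Chars.strip paragraph.toList)).countP
      (fun w => decide (w.length ≥ 3) && pvEvenOk w && pvOddOk w) : Int)

-- ===== PRECONDITION & SPEC =====
def Spec_count_mixified (paragraph : String) (out : Int) : Prop := out = count_mixified_alt paragraph
instance (paragraph : String) (out : Int) : Decidable (Spec_count_mixified paragraph out) := by unfold Spec_count_mixified; infer_instance

-- ===== CLAIM (what is proved, stated in full; the proofs are below) =====
def Claim_equal_count_mixified : Prop := ∀ (paragraph : String), Dom_count_mixified paragraph → Spec_count_mixified paragraph (count_mixified paragraph)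

-- ===== LEMMAS AND PROOFS =====

/-- even-index elements of a list -/
def pvEvens {α : Type} : List α → List α
  | [] => []
  | [a] => [a]
  | a :: _ :: t => a :: pvEvens t

theorem pvEvens_cons {α : Type} (a : α) (r : List α) :
    pvEvens (a :: r) = a :: pvEvens r.tail := by
  cases r <;> simp [pvEvens]

/-- the nat-index contents of a step-2 slice starting at 0 -/
theorem pv_filterMap_evens {α : Type} (w : List α) :
    List.filterMap (fun k => w[2*k]?) (List.range ((w.length + 1)/2)) = pvEvens w := by
  induction w using pvEvens.induct with
  | case1 => simp [pvEvens]
  | case2 a => simp [pvEvens]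
  | case3 a b t ih =>
    have hn : ((a :: b :: t).length + 1) / 2 = (t.length + 1) / 2 + 1 := by
      simp; omega
    rw [hn, List.range_succ_eq_map, List.filterMap_cons, List.filterMap_map]
    norm_num [pvEvens]
    rw [← ih]
    apply List.filterMap_congr
    intro k _
    have h2 : 2 * Nat.succ k = (2 * k + 1) + 1 := by omega
    simp [h2]

theorem pv_slice_evens {α : Type} (w : List α) :
    PySem.List.slice? w none none 2 = some (pvEvens w) := by
  simp only [PySem.List.slice?, PySem.List.sliceIndices]
  norm_num
  rcases w with _ | ⟨a, r⟩
  · simp [pvEvens]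
  · rw [if_pos (by simp : 0 < (a :: r).length)]
    rw [← pv_filterMap_evens (a :: r)]
    have hc : (((((a :: r).length : Int)) + 2 - 1) / 2).toNat = ((a :: r).length + 1) / 2 := by
      omega
    rw [hc]
    apply List.filterMap_congr
    intro k _
    have hk : ((2 * (k:Int)).toNat) = 2 * k := by omega
    rw [hk]

theorem pv_slice_odds {α : Type} (w : List α) :
    PySem.List.slice? w (some 1) none 2 = some (pvEvens w.tail) := by
  simp only [PySem.List.slice?, PySem.List.sliceIndices]
  norm_num
  rcases w with _ | ⟨a, r⟩
  · simp [pvEvens]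
  · have h1 : min (1:Int) ((a :: r).length : Int) = 1 := by
      have : (1:Int) ≤ ((a :: r).length : Int) := by simp
      omega
    rw [h1]
    by_cases hlt : 1 < (a :: r).length
    · rw [if_pos hlt]
      rw [List.tail_cons, ← pv_filterMap_evens r]
      have hc : ((((a :: r).length : Int) - 1 + 2 - 1) / 2).toNat = (r.length + 1) / 2 := by
        have h3 : ((a :: r).length : Int) = (r.length : Int) + 1 := by simp
        omega
      rw [hc]
      apply List.filterMap_congr
      intro k _
      have h2 : ((1 + 2 * (k:Int)).toNat) = 2 * k + 1 := by omega
      rw [h2]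
      simp
    · rcases r with _ | ⟨x, s⟩
      · rw [if_neg hlt]
        simp [pvEvens]
      · exact absurd (by simp : 1 < (a :: x :: s).length) hlt

/-- alternating all-check: first char with f, then alternate -/
def pvChk (f g : Char → Bool) : List Char → Bool
  | [] => true
  | c :: t => f c && pvChk g f t

theorem pv_evens_odds_chk (f g : Char → Bool) (w : List Char) :
    ((pvEvens w).all f && (pvEvens w.tail).all g) = pvChk f g w := by
  induction w using pvEvens.induct generalizing f g with
  | case1 => simp [pvEvens, pvChk]
  | case2 a => simp [pvEvens, pvChk]
  | case3 a b t ih =>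
    simp only [pvEvens, List.tail_cons, pvEvens_cons, List.all_cons, pvChk]
    rw [← ih f g]
    cases f a <;> cases g b <;> simp [Bool.and_comm]

def pvUpOk (c : Char) : Bool := !PySem.Chars.isalpha c || pvUpperA.contains c
def pvLowOk (c : Char) : Bool := !PySem.Chars.isalpha c || pvLowerA.contains c

def pvStep (counter : Bool) (ic : Int × Char) : Bool :=
  if PySem.Chars.isalpha ic.2 then
    let counter1 :=
      if PySem.Int.mod ic.1 2 = 0 then
        (if ¬ pvUpperA.contains ic.2 then false else counter)
      else counter
    if PySem.Int.mod ic.1 2 = 1 then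
      (if ¬ pvLowerA.contains ic.2 then false else counter1)
    else counter1
  else counter

theorem pvStep_eq (counter : Bool) (i : Int) (c : Char) :
    pvStep counter (i, c) =
      (counter && (if PySem.Int.mod i 2 = 0 then pvUpOk c else pvLowOk c)) := by
  have hm : PySem.Int.mod i 2 = 0 ∨ PySem.Int.mod i 2 = 1 := by
    have h1 := PySem.Int.mod_nonneg i (b := 2) (by omega)
    have h2 := PySem.Int.mod_lt i (b := 2) (by omega)
    omega
  simp only [pvStep, pvUpOk, pvLowOk]
  rcases hm with hm | hm <;> rw [hm] <;> norm_num <;>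
    cases counter <;> by_cases ha : PySem.Chars.isalpha c <;>
      by_cases hc : (pvUpperA.contains c : Bool) = true <;>
      by_cases hd : (pvLowerA.contains c : Bool) = true <;>
      simp_all

theorem pv_enumerate_cons {α : Type} (a : α) (t : List α) (s : Int) :
    PySem.List.enumerate (a :: t) s = (s, a) :: PySem.List.enumerate t (s + 1) := by
  rfl

theorem pv_mod_succ (i : Int) :
    PySem.Int.mod (i + 1) 2 = 0 ↔ ¬ PySem.Int.mod i 2 = 0 := by
  have e1 : PySem.Int.mod (i+1) 2 = (i+1) % 2 := PySem.Int.mod_eq_emod_of_pos (by omega)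
  have e2 : PySem.Int.mod i 2 = i % 2 := PySem.Int.mod_eq_emod_of_pos (by omega)
  rw [e1, e2]
  omega

theorem pv_fold_chk (w : List Char) (b : Bool) (i : Int) :
    (PySem.List.enumerate w i).foldl pvStep b =
      (b && (if PySem.Int.mod i 2 = 0 then pvChk pvUpOk pvLowOk w else pvChk pvLowOk pvUpOk w)) := by
  induction w generalizing b i with
  | nil => simp [PySem.List.enumerate, pvChk]
  | cons c t ih =>
    rw [pv_enumerate_cons, List.foldl_cons, pvStep_eq b i c, ih _ (i+1)]
    by_cases hm : PySem.Int.mod i 2 = 0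
    · have hm1 : ¬ PySem.Int.mod (i+1) 2 = 0 := by rw [pv_mod_succ]; exact not_not_intro hm
      rw [if_pos hm, if_neg hm1]
      simp only [pvChk, Bool.and_assoc]
      rw [if_pos hm]
    · have hm1 : PySem.Int.mod (i+1) 2 = 0 := by rw [pv_mod_succ]; exact hm
      rw [if_neg hm, if_pos hm1]
      simp only [pvChk, Bool.and_assoc]
      rw [if_neg hm]

theorem pv_word_eq (w : List Char) :
    (PySem.List.enumerate w 0).foldl pvStep true = (pvEvenOk w && pvOddOk w) := by
  rw [pv_fold_chk w true 0]
  rw [if_pos (by decide : PySem.Int.mod 0 2 = 0), Bool.true_and]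
  have he : pvEvenOk w = (pvEvens w).all pvUpOk := by
    rw [pvEvenOk, pv_slice_evens]; rfl
  have ho : pvOddOk w = (pvEvens w.tail).all pvLowOk := by
    rw [pvOddOk, pv_slice_odds]; rfl
  rw [he, ho, pv_evens_odds_chk]

-- ===== VERDICT (by name: the statement is the Claim_ definition above) =====
theorem count_mixified_spec : Claim_equal_count_mixified := by
  intro paragraph _
  unfold Spec_count_mixified count_mixified count_mixified_alt
  have hbody : ∀ (num_words : Int) (word : List Char),
      (if word.length ≥ 3 then
        (if ((PySem.List.enumerate word).foldl pvStep true) = true then num_words + 1 else num_words)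
      else num_words)
      = (if (decide (word.length ≥ 3) && pvEvenOk word && pvOddOk word) = true
          then num_words + 1 else num_words) := by
    intro n word
    rw [pv_word_eq word]
    by_cases h3 : word.length ≥ 3 <;>
      by_cases he : (pvEvenOk word && pvOddOk word) = true <;> simp [h3, he]
  calc (PySem.Chars.split₀ (PySem.Chars.strip paragraph.toList)).foldl
        (fun num_words word =>
          if word.length ≥ 3 then
            (if ((PySem.List.enumerate word).foldl pvStep true) = true then num_words + 1 else num_words)
          else num_words) 0
      = (PySem.Chars.split₀ (PySem.Chars.strip paragraph.toList)).foldl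
        (fun num_words word =>
          if (decide (word.length ≥ 3) && pvEvenOk word && pvOddOk word) = true
          then num_words + 1 else num_words) 0 := by
        apply PySem.List.foldl_congr_mem
        intro acc word _
        exact hbody acc word
    _ = 0 + ((PySem.Chars.split₀ (PySem.Chars.strip paragraph.toList)).countP
          (fun w => decide (w.length ≥ 3) && pvEvenOk w && pvOddOk w) : Int) :=
        PySem.List.foldl_count_if _ _ 0
    _ = _ := by rw [zero_add]
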